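-- pv_equiv track=rewrite | github.com/bhelga/university | python/Lab8/Lab8_4.py | create_text
-- ===== SOURCE A (Python) =====
-- def create_text(first_text, second_text):
--     key = " "
--     final = []
--     for i in range(len(first_text)):
--         for j in range(len(second_text)):
--             if first_text[i] == second_text[j]:
--                 break
--             if j == len(second_text) - 1:
--                 if first_text[i] != key:
--                     final.append(first_text[i])
--                 key = first_text[i]
--     return final
-- ===== SOURCE B (Python) =====
-- def create_text(first_text, second_text):
--     table = {ord(c): None for c in second_text}
--     kept = first_text.translate(table)
--     return list(kept[:1]) + [b for a, b in zip(kept, kept[1:]) if a != b]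
-- ===== Notes on version B (the rewrite author's own statement) =====
-- stated objective: faster
-- what changed: Replaces A's nested index loops with key sentinel and last-position test by a str.translate deletion table and a loop-free zip-with-predecessor comprehension that keeps each character differing from the one before it.
-- intended difference: When second_text is empty A returns [] (its inner loop never runs) and when the first kept character is a space A silently drops that leading space run (key is initialized to ' '); B returns the filtered, consecutively-deduplicated characters in both cases, which is the intended behaviour of the filter-and-collapse task. — e.g. on create_text("a", ""): A returns [], B returns ["a"]
import Mathlib
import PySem

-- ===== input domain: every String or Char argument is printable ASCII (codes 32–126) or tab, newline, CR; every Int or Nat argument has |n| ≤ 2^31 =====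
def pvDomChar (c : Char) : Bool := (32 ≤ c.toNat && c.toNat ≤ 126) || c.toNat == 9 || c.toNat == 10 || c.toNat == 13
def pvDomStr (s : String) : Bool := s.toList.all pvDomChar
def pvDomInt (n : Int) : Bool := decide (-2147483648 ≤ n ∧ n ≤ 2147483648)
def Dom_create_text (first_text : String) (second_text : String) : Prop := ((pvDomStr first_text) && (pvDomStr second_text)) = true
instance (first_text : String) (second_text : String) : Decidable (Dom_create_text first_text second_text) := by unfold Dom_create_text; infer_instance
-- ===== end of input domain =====

-- B replaces A's nested index loops (key sentinel, break, last-position test) by a translate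
-- deletion table built from second_text and a loop-free zip-with-predecessor comprehension
-- that keeps each character differing from its predecessor; objective: faster.

-- ===== PORT A =====
-- inner 'for j in range(len(second_text))' loop of A, for one character c of first_text;
-- state is (key, final); 'break' returns the state unchanged
def createTextInner (sl : List Char) (c key : Char) (final : List String) (j : Nat) :
    Char × List String :=
  if h : j < sl.length then
    if c == sl[j] then (key, final)          -- break
    else if j == sl.length - 1 then
      createTextInner sl c c (if c != key then final ++ [String.ofList [c]] else final) (j + 1)
    else createTextInner sl c key final (j + 1)
  else (key, final)
termination_by sl.length - j

def create_text (first_text : String) (second_text : String) : List String :=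
  ((PySem.List.pyRange 0 (PySem.List.len first_text.toList) 1).foldl
    (fun (st : Char × List String) i =>
      createTextInner second_text.toList (PySem.List.pyGetD first_text.toList i ' ') st.1 st.2 0)
    (' ', ([] : List String))).2

-- ===== PORT B =====
-- 'first_text.translate({ord(c): None for c in second_text})' : the dict comprehension is the
-- insert fold, and translate with every value None deletes exactly the chars whose ord is a key
-- (ported, exactly, as that filter); then 'list(kept[:1]) + [b for a, b in zip(kept, kept[1:]) if a != b]'
def create_text_alt (first_text : String) (second_text : String) : List String :=
  let table : PySem.Dict Int Unit :=
    second_text.toList.foldl (fun d c => d.insert ((c.toNat : Int)) ()) PySem.Dict.empty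
  let kept : List Char :=
    first_text.toList.filter (fun c => (table.get? ((c.toNat : Int))).isNone)
  (kept.take 1).map (fun c => String.ofList [c]) ++
    (kept.zip (kept.drop 1)).filterMap
      (fun p => if p.1 ≠ p.2 then some (String.ofList [p.2]) else none)

-- ===== PRECONDITION & SPEC =====
-- When second_text is empty A returns [] (its inner loop never runs) and when the first kept
-- character is a space A drops that leading space run (key is initialized to ' '); B returns the
-- filtered, consecutively-deduplicated characters in both cases, the intended filter-and-collapse.
def D_create_text (first_text : String) (second_text : String) : Prop :=
  (second_text = "" ∧ first_text ≠ "") ∨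
  (second_text ≠ "" ∧
    (first_text.toList.filter (fun c => !(second_text.toList.contains c))).head? = some ' ')
instance (first_text : String) (second_text : String) : Decidable (D_create_text first_text second_text) := by
  unfold D_create_text; infer_instance

def Spec_create_text (first_text : String) (second_text : String) (out : List String) : Prop :=
  ¬ D_create_text first_text second_text → out = create_text_alt first_text second_text
instance (first_text : String) (second_text : String) (out : List String) : Decidable (Spec_create_text first_text second_text out) := by
  unfold Spec_create_text; infer_instance

def pvDiffWitness_create_text : String × String := ("a", "")
def pvDiffWitnessOut_create_text : (List String) × (List String) := ([], ["a"])

-- ===== CLAIM (what is proved, stated in full; the proofs are below) =====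
def Claim_unchanged_create_text : Prop := ∀ (first_text : String) (second_text : String), Dom_create_text first_text second_text → Spec_create_text first_text second_text (create_text first_text second_text)
def Claim_changed_create_text : Prop := Dom_create_text (pvDiffWitness_create_text.1) (pvDiffWitness_create_text.2) ∧ D_create_text (pvDiffWitness_create_text.1) (pvDiffWitness_create_text.2) ∧ create_text (pvDiffWitness_create_text.1) (pvDiffWitness_create_text.2) = pvDiffWitnessOut_create_text.1 ∧ create_text_alt (pvDiffWitness_create_text.1) (pvDiffWitness_create_text.2) = pvDiffWitnessOut_create_text.2 ∧ pvDiffWitnessOut_create_text.1 ≠ pvDiffWitnessOut_create_text.2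
def Claim_exact_create_text : Prop := ∀ (first_text : String) (second_text : String), Dom_create_text first_text second_text → D_create_text first_text second_text → create_text first_text second_text ≠ create_text_alt first_text second_text

-- ===== LEMMAS AND PROOFS =====

-- A's per-character step over the filtered stream
def stepA (st : Char × List String) (c : Char) : Char × List String :=
  (c, if c != st.1 then st.2 ++ [String.ofList [c]] else st.2)

-- characterization of A's inner loop
set_option maxRecDepth 16384 in
theorem inner_general (sl : List Char) (c : Char) :
    ∀ (n j : Nat) (key : Char) (final : List String), sl.length - j ≤ n →
      createTextInner sl c key final j =
        if c ∈ sl.drop j then (key, final)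
        else if j < sl.length then (c, if c != key then final ++ [String.ofList [c]] else final)
        else (key, final) := by
  intro n
  induction n with
  | zero =>
    intro j key final hle
    have hj : ¬ j < sl.length := by omega
    rw [createTextInner]
    simp [hj, List.drop_eq_nil_of_le (by omega : sl.length ≤ j)]
  | succ n ih =>
    intro j key final hle
    by_cases hj : j < sl.length
    · rw [createTextInner]
      have hdrop : sl.drop j = sl[j] :: sl.drop (j + 1) := List.drop_eq_getElem_cons hj
      by_cases heq : c = sl[j]
      · rw [dif_pos hj, if_pos (beq_iff_eq.mpr heq),
          if_pos (show c ∈ sl.drop j from by rw [hdrop, heq]; exact List.mem_cons_self)]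
      · by_cases hlast : j = sl.length - 1
        · have hd2 : sl.drop (j + 1) = [] := List.drop_eq_nil_of_le (by omega)
          have hle' : sl.length - (j + 1) ≤ n := by omega
          have hnl : ¬ (j + 1 < sl.length) := by omega
          rw [dif_pos hj, if_neg (by simpa using heq), if_pos (by simpa using hlast),
            ih (j + 1) c _ hle', hd2, hdrop, hd2]
          simp [heq, hj, hnl]
        · have hj' : j + 1 < sl.length := by omega
          have hle' : sl.length - (j + 1) ≤ n := by omega
          have hmem : c ∈ sl.drop j ↔ c ∈ sl.drop (j + 1) := by
            rw [hdrop]; exact List.mem_cons.trans (or_iff_right heq)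
          rw [dif_pos hj, if_neg (by simpa using heq), if_neg (by simpa using hlast),
            ih (j + 1) key final hle']
          simp only [hmem]
          by_cases hm : c ∈ sl.drop (j + 1) <;> simp [hm, hj, hj']
    · rw [createTextInner]
      simp [hj, List.drop_eq_nil_of_le (by omega : sl.length ≤ j)]

theorem inner_spec (sl : List Char) (c key : Char) (final : List String) :
    createTextInner sl c key final 0 =
      if c ∈ sl then (key, final)
      else if 0 < sl.length then (c, if c != key then final ++ [String.ofList [c]] else final)
      else (key, final) := by
  simpa using inner_general sl c sl.length 0 key final (by omega)

-- A's outer loop reduces to a fold of stepA over the filtered character list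
theorem A_eq_fold_filter (fl sl : List Char) (st : Char × List String) (hsl : sl ≠ []) :
    fl.foldl (fun st c => createTextInner sl c st.1 st.2 0) st =
      (fl.filter (fun c => !(sl.contains c))).foldl stepA st := by
  induction fl generalizing st with
  | nil => rfl
  | cons c t ih =>
    simp only [List.foldl_cons, List.filter_cons]
    by_cases hmem : c ∈ sl
    · have : (!(sl.contains c)) = false := by simp [hmem]
      rw [this, inner_spec]
      simp [hmem, ih]
    · have : (!(sl.contains c)) = true := by simp [hmem]
      rw [this, inner_spec]
      have hpos : 0 < sl.length := List.length_pos_iff.mpr hsl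
      simp only [hmem, if_false, if_pos hpos, ite_true]
      rw [List.foldl_cons]
      exact ih _

-- fold of stepA emits exactly the zip-with-predecessor pairs that differ
theorem stepA_zip (t : List Char) :
    ∀ (key : Char) (out : List String),
      (t.foldl stepA (key, out)).2 =
        out ++ ((key :: t).zip t).filterMap
          (fun p => if p.1 ≠ p.2 then some (String.ofList [p.2]) else none) := by
  induction t with
  | nil => intro key out; simp
  | cons c t ih =>
    intro key out
    simp only [List.foldl_cons, List.zip_cons_cons, List.filterMap_cons]
    by_cases h : c = key
    · have h1 : stepA (key, out) c = (c, out) := by simp [stepA, h]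
      rw [h1, ih c out]
      simp [h]
    · have h1 : stepA (key, out) c = (c, out ++ [String.ofList [c]]) := by simp [stepA, h]
      rw [h1, ih c (out ++ [String.ofList [c]])]
      have : key ≠ c := fun hc => h hc.symm
      simp [this]

-- the deletion table's lookup is membership of second_text's characters
theorem table_isNone (s : String) (c : Char) :
    ((s.toList.foldl (fun d c => d.insert ((c.toNat : Int)) ()) PySem.Dict.empty).get?
        ((c.toNat : Int))).isNone = !(s.toList.contains c) := by
  have hkeys :
      (s.toList.foldl (fun d c => d.insert ((c.toNat : Int)) ()) PySem.Dict.empty).keys =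
        PySem.Set.update PySem.Dict.empty.keys (s.toList.map (fun c => ((c.toNat : Int)))) :=
    PySem.Dict.keys_foldl_insert_key s.toList (fun c => ((c.toNat : Int))) (fun _ _ => ()) _
  have hmem : ((c.toNat : Int)) ∈ s.toList.map (fun c => ((c.toNat : Int))) ↔ c ∈ s.toList := by
    constructor
    · intro h
      rcases List.mem_map.mp h with ⟨c', hc', he⟩
      have hcc : c' = c := by
        have hn : c'.toNat = c.toNat := by exact_mod_cast he
        have := congrArg Char.ofNat hn
        simpa [Char.ofNat_toNat] using this
      exact hcc ▸ hc'
    · intro h; exact List.mem_map.mpr ⟨c, h, rfl⟩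
  have hkmem : ((c.toNat : Int)) ∈
      (s.toList.foldl (fun d c => d.insert ((c.toNat : Int)) ()) PySem.Dict.empty).keys ↔
        c ∈ s.toList := by
    rw [hkeys, PySem.Set.update_eq_append_filter]
    simp [pysem, hmem]
  have hiff := PySem.Dict.get?_eq_none_iff_not_mem_keys
    (d := s.toList.foldl (fun d c => d.insert ((c.toNat : Int)) ()) PySem.Dict.empty)
    (k := ((c.toNat : Int)))
  by_cases h : c ∈ s.toList
  · have hne : (s.toList.foldl (fun d c => d.insert ((c.toNat : Int)) ())
        PySem.Dict.empty).get? ((c.toNat : Int)) ≠ none :=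
      fun hn => (hiff.mp hn) (hkmem.mpr h)
    cases hg : (s.toList.foldl (fun d c => d.insert ((c.toNat : Int)) ())
        PySem.Dict.empty).get? ((c.toNat : Int)) with
    | none => exact absurd hg hne
    | some v => simp [h]
  · have hnone : (s.toList.foldl (fun d c => d.insert ((c.toNat : Int)) ())
        PySem.Dict.empty).get? ((c.toNat : Int)) = none :=
      hiff.mpr (fun hk => h (hkmem.mp hk))
    simp [hnone, h]

-- unfold of B's port: its kept list is the plain membership filter
theorem create_text_alt_eq (f s : String) :
    create_text_alt f s =
      (((f.toList.filter (fun c => !(s.toList.contains c))).take 1).map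
          (fun c => String.ofList [c])) ++
        (((f.toList.filter (fun c => !(s.toList.contains c))).zip
            ((f.toList.filter (fun c => !(s.toList.contains c))).drop 1)).filterMap
          (fun p => if p.1 ≠ p.2 then some (String.ofList [p.2]) else none)) := by
  simp only [create_text_alt]
  rw [List.filter_congr (fun c _ => table_isNone s c)]

-- unfold of A's port to a plain foldl over the characters
theorem create_text_eq (f s : String) :
    create_text f s =
      (f.toList.foldl (fun st c => createTextInner s.toList c st.1 st.2 0)
        (' ', ([] : List String))).2 := by
  unfold create_text
  rw [PySem.List.foldl_pyRange_zero_pyGetD f.toList ' '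
    (fun st c => createTextInner s.toList c st.1 st.2 0) (' ', ([] : List String))]

theorem toList_ne_nil {s : String} (h : s ≠ "") : s.toList ≠ [] := by
  intro hc
  have := congrArg String.ofList hc
  exact h (by simpa using this)

theorem toList_eq_nil {s : String} (h : s = "") : s.toList = [] := by
  subst h; rfl

-- the main agreement argument
theorem main_agree (f s : String) (hs : s.toList ≠ [])
    (hhead : (f.toList.filter (fun c => !(s.toList.contains c))).head? ≠ some ' ') :
    create_text f s = create_text_alt f s := by
  rw [create_text_eq, create_text_alt_eq,
    A_eq_fold_filter f.toList s.toList (' ', []) hs]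
  generalize hfil : f.toList.filter (fun c => !(s.toList.contains c)) = fil
  rw [hfil] at hhead
  cases fil with
  | nil => rfl
  | cons c t =>
    have hc : c ≠ ' ' := by
      intro h; exact hhead (by simp [h])
    simp only [List.foldl_cons]
    have h1 : stepA (' ', []) c = (c, [String.ofList [c]]) := by simp [stepA, hc]
    rw [h1, stepA_zip t c [String.ofList [c]]]
    simp

-- ===== VERDICT (by name: the statement is the Claim_ definition above) =====
theorem create_text_spec : Claim_unchanged_create_text := by
  intro f s _ hD
  unfold D_create_text at hD
  by_cases hs : s = ""
  · have hf : f = "" := by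
      by_contra hf
      exact hD (Or.inl ⟨hs, hf⟩)
    subst hs; subst hf
    rfl
  · have hh : (f.toList.filter (fun c => !(s.toList.contains c))).head? ≠ some ' ' := by
      intro hh
      exact hD (Or.inr ⟨hs, hh⟩)
    exact main_agree f s (toList_ne_nil hs) hh

theorem create_text_changed : Claim_changed_create_text := by
  unfold Claim_changed_create_text
  refine ⟨by decide, by decide, ?_, by decide, by decide⟩
  show create_text "a" "" = ([] : List String)
  rw [create_text_eq]
  have h1 : ("a".toList) = ['a'] := rfl
  have h2 : ("".toList) = ([] : List Char) := rfl
  rw [h1, h2]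
  simp only [List.foldl_cons, List.foldl_nil]
  rw [inner_spec]
  simp

theorem create_text_tight : Claim_exact_create_text := by
  intro f s _ hD heq
  unfold D_create_text at hD
  rcases hD with ⟨hs, hf⟩ | ⟨hs, hhead⟩
  · -- second_text = "": A = [], B is nonempty
    have hA : create_text f s = [] := by
      rw [create_text_eq, toList_eq_nil hs]
      have : ∀ (l : List Char) (st : Char × List String),
          l.foldl (fun st c => createTextInner ([] : List Char) c st.1 st.2 0) st = st := by
        intro l
        induction l with
        | nil => intro st; rfl
        | cons c t ih =>
          intro st
          simp only [List.foldl_cons]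
          rw [inner_spec]
          simp [ih]
      rw [this]
    have hB : create_text_alt f s ≠ [] := by
      rw [create_text_alt_eq]
      have hfilter : f.toList.filter (fun c => !(s.toList.contains c)) = f.toList := by
        simp [toList_eq_nil hs]
      rw [hfilter]
      cases hcons : f.toList with
      | nil => exact absurd hcons (toList_ne_nil hf)
      | cons c t => simp
    rw [heq] at hA
    exact hB hA
  · -- leading kept space: B = " " :: A, so lengths differ
    have hsl : s.toList ≠ [] := toList_ne_nil hs
    rw [create_text_eq, create_text_alt_eq,
      A_eq_fold_filter f.toList s.toList (' ', []) hsl] at heq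
    generalize hfil : f.toList.filter (fun c => !(s.toList.contains c)) = fil at heq hhead
    cases fil with
    | nil => simp at hhead
    | cons c t =>
      have hc : c = ' ' := by simpa using hhead
      subst hc
      simp only [List.foldl_cons] at heq
      have h1 : stepA (' ', ([] : List String)) ' ' = (' ', []) := by simp [stepA]
      rw [h1, stepA_zip t ' ' []] at heq
      have := congrArg List.length heq
      simp at this
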